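-- pv_equiv track=rewrite | github.com/JoryWeb/illuminati | poi_x_pretensa/report/oferta_producto.py | _convert_nn2
-- ===== SOURCE A (Python) =====
-- to_19 = ( 'Cero',  'Uno', 'Dos',  'Tres', 'Cuatro',   'Cinco',   'Seis',
--           'Siete', 'Ocho', 'Nueve', 'Diez',   'Once', 'Doce', 'Trece',
--           'Catorce', 'Quince', 'Dieciseis', 'Diecisiete', 'Dieciocho', 'Diecinueve' )
--
-- tens  = ( 'Veinte', 'Treinta', 'Cuarenta', 'Cincuenta', 'Sesenta', 'Setenta', 'Ochenta', 'Noventa')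
--
-- def _convert_nn2(val):
--     """convert a value < 100 to English.
--     """
--     if val < 20:
--         return to_19[val]
--     for (dcap, dval) in ((k, 20 + (10 * v)) for (v, k) in enumerate(tens)):
--         if dval + 10 > val:
--             if val % 10:
--                 if val>20 and val<30:
--                     return "Veinti"+to_19[val % 10]
--                 else:
--                     return dcap + ' Y ' + to_19[val % 10]
--             return dcap
-- ===== SOURCE B (Python) =====
-- to_19 = ( 'Cero',  'Uno', 'Dos',  'Tres', 'Cuatro',   'Cinco',   'Seis',
--           'Siete', 'Ocho', 'Nueve', 'Diez',   'Once', 'Doce', 'Trece',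
--           'Catorce', 'Quince', 'Dieciseis', 'Diecisiete', 'Dieciocho', 'Diecinueve' )
--
-- tens  = ( 'Veinte', 'Treinta', 'Cuarenta', 'Cincuenta', 'Sesenta', 'Setenta', 'Ochenta', 'Noventa')
--
-- def _convert_nn2(val):
--     """convert a value < 100 to Spanish words (closed-form bucket index, no scan)."""
--     if val < 20:
--         return to_19[val]
--     d, u = divmod(val, 10)
--     dcap = tens[d - 2]
--     if u == 0:
--         return dcap
--     if d == 2:
--         return "Veinti" + to_19[u]
--     return dcap + ' Y ' + to_19[u]
-- ===== Notes on version B (the rewrite author's own statement) =====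
-- stated objective: simpler
-- what changed: Replaces A's linear scan over enumerate(tens) with closed-form divmod bucket indexing (tens[val//10 - 2]), keeping the Veinti/' Y ' formatting.
-- outside the precondition, e.g. on _convert_nn2(100): A returns None, B raises IndexError
import Mathlib
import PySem

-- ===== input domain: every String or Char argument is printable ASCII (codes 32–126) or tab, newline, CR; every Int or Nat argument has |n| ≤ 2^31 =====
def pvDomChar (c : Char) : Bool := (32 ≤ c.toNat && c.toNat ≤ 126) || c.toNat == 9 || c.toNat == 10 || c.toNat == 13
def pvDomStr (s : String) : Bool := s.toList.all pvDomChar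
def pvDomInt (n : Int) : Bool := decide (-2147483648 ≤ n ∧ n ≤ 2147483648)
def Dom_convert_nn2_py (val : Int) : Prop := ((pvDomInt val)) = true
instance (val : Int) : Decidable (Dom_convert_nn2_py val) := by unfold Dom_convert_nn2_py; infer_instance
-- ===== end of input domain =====

-- B replaces A's linear scan over enumerate(tens) with closed-form divmod bucket indexing; same values on Pre_.
-- ===== PORT A =====
def pvTo19 : List String := ["Cero", "Uno", "Dos", "Tres", "Cuatro", "Cinco", "Seis",
  "Siete", "Ocho", "Nueve", "Diez", "Once", "Doce", "Trece",
  "Catorce", "Quince", "Dieciseis", "Diecisiete", "Dieciocho", "Diecinueve"]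

def pvTens : List String := ["Veinte", "Treinta", "Cuarenta", "Cincuenta", "Sesenta", "Setenta", "Ochenta", "Noventa"]

-- the for-loop over ((k, 20+10*v) for (v,k) in enumerate(tens)); falling off the loop is
-- Python's implicit `return None`, excluded by Pre_, rendered as "".
def convert_nn2_py_loop (val : Int) : List (Int × String) → String
  | [] => ""
  | (v, dcap) :: rest =>
    let dval : Int := 20 + 10 * v
    if dval + 10 > val then
      if PySem.Int.mod val 10 ≠ 0 then
        if val > 20 ∧ val < 30 then
          "Veinti" ++ (PySem.List.pyGet? pvTo19 (PySem.Int.mod val 10)).getD ""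
        else
          dcap ++ " Y " ++ (PySem.List.pyGet? pvTo19 (PySem.Int.mod val 10)).getD ""
      else dcap
    else convert_nn2_py_loop val rest

def convert_nn2_py (val : Int) : String :=
  if val < 20 then (PySem.List.pyGet? pvTo19 val).getD ""
  else convert_nn2_py_loop val (PySem.List.enumerate pvTens)

-- ===== PORT B =====
def convert_nn2_py_alt (val : Int) : String :=
  if val < 20 then (PySem.List.pyGet? pvTo19 val).getD ""
  else
    let d := PySem.Int.floordiv val 10
    let u := PySem.Int.mod val 10
    let dcap := (PySem.List.pyGet? pvTens (d - 2)).getD ""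
    if u = 0 then dcap
    else if d = 2 then "Veinti" ++ (PySem.List.pyGet? pvTo19 u).getD ""
    else dcap ++ " Y " ++ (PySem.List.pyGet? pvTo19 u).getD ""

-- ===== PRECONDITION & SPEC =====
-- Pre_ excludes too-negative values, on which A's to_19 indexing raises IndexError, and
-- values of a hundred or more, on which A falls through its loop and returns None rather than a string.
def Pre_convert_nn2_py (val : Int) : Prop := -20 ≤ val ∧ val < 100
instance (val : Int) : Decidable (Pre_convert_nn2_py val) := by unfold Pre_convert_nn2_py; infer_instance
def pvWitness_convert_nn2_py : Int := (42)
def Spec_convert_nn2_py (val : Int) (out : String) : Prop := out = convert_nn2_py_alt val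
instance (val : Int) (out : String) : Decidable (Spec_convert_nn2_py val out) := by unfold Spec_convert_nn2_py; infer_instance

-- ===== CLAIM (what is proved, stated in full; the proofs are below) =====
def Claim_equal_convert_nn2_py : Prop := ∀ (val : Int), Dom_convert_nn2_py val → Pre_convert_nn2_py val → Spec_convert_nn2_py val (convert_nn2_py val)

-- ===== LEMMAS AND PROOFS =====

-- ===== VERDICT (by name: the statement is the Claim_ definition above) =====
set_option maxRecDepth 4000 in
theorem convert_nn2_py_spec : Claim_equal_convert_nn2_py := by
  intro val _ hpre
  obtain ⟨h1, h2⟩ := hpre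
  unfold Spec_convert_nn2_py
  interval_cases val <;> rfl
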